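-- pv_equiv track=rewrite | github.com/pypi-data/pypi-mirror-368 | packages/PyBigDFT/pybigdft-1.9.6.0-py3-none-any.whl/BigDFT/Systems.py | select_from_view
-- ===== SOURCE A (Python) =====
-- def select_from_view(view, targets):
--     """
--     Identify the fragments of the view that contain
--     at least one of the targets
--
--     Args:
--         view (dict): if present, identifies the fragments that contain the
--             relevant units
--         targets (list): list of the fragments to search in the view
--     Returns:
--         list: fragments to select
--     """
--     reselect = []
--     for frag in targets:
--         for key, val in view.items():
--             if frag in val and key not in reselect:
--                 reselect.append(key)
--                 break
--     return reselect
-- ===== SOURCE B (Python) =====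
-- def select_from_view(view, targets):
--     # Reverse index: element -> keys (in view order) whose value list contains it.
--     index = {}
--     for key, val in view.items():
--         for elem in val:
--             index.setdefault(elem, []).append(key)
--     reselect = []
--     selected = set()
--     for frag in targets:
--         for key in index.get(frag, []):
--             if key not in selected:
--                 reselect.append(key)
--                 selected.add(key)
--                 break
--     return reselect
-- ===== Notes on version B (the rewrite author's own statement) =====
-- stated objective: faster
-- what changed: Instead of rescanning the whole view for every target, B builds a reverse index element->keys once and, per target, picks the first indexed key not already selected (tracked in a set).
import Mathlib
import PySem

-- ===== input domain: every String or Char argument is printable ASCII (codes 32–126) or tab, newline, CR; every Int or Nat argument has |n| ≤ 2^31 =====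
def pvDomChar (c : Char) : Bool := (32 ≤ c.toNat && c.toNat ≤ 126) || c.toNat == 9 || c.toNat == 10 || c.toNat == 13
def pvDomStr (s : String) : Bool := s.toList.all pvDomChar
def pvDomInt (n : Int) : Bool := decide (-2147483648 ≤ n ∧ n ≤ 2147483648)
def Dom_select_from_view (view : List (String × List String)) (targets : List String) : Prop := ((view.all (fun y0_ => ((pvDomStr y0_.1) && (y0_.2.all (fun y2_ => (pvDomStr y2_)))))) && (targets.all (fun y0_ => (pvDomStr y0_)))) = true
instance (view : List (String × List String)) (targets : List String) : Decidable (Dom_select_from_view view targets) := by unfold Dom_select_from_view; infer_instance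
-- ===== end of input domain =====

-- B builds a reverse index element→keys once, then answers each target by one lookup; return values proved equal.

-- ===== PORT A =====
-- inner 'for key, val in view.items(): … break' of A
def svA_find (view : List (String × List String)) (frag : String) (reselect : List String) : List String :=
  match view with
  | [] => reselect
  | (key, val) :: rest =>
    if val.contains frag && !(reselect.contains key) then reselect ++ [key]
    else svA_find rest frag reselect

def select_from_view (view : List (String × List String)) (targets : List String) : List String :=
  targets.foldl (fun reselect frag => svA_find view frag reselect) []

-- ===== PORT B =====
-- index.setdefault(elem, []).append(key), over all pairs of view
def svB_index (view : List (String × List String)) : PySem.Dict String (List String) :=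
  view.foldl (fun d kv => kv.2.foldl (fun d elem => d.modify elem [] (· ++ [kv.1])) d)
    PySem.Dict.empty

-- inner 'for key in index.get(frag, []): … break' of B
def svB_pick (keys : List String) (selected : PySem.Set String) : Option String :=
  match keys with
  | [] => none
  | k :: rest => if PySem.Set.contains selected k then svB_pick rest selected else some k

def select_from_view_alt (view : List (String × List String)) (targets : List String) : List String :=
  let index := svB_index view
  (targets.foldl (fun (acc : List String × PySem.Set String) frag =>
      match svB_pick (index.getD frag []) acc.2 with
      | none => acc
      | some k => (acc.1 ++ [k], PySem.Set.add acc.2 k)) ([], PySem.Set.empty)).1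

-- ===== PRECONDITION & SPEC =====
def Spec_select_from_view (view : List (String × List String)) (targets : List String) (out : List String) : Prop := out = select_from_view_alt view targets
instance (view : List (String × List String)) (targets : List String) (out : List String) : Decidable (Spec_select_from_view view targets out) := by unfold Spec_select_from_view; infer_instance

-- ===== CLAIM (what is proved, stated in full; the proofs are below) =====
def Claim_equal_select_from_view : Prop := ∀ (view : List (String × List String)) (targets : List String), Dom_select_from_view view targets → Spec_select_from_view view targets (select_from_view view targets)

-- ===== LEMMAS AND PROOFS =====

-- keys (with multiplicity) whose value list contains frag, in view order
def svKeysFor (view : List (String × List String)) (frag : String) : List String :=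
  view.flatMap (fun kv => (kv.2.filter (· == frag)).map (fun _ => kv.1))

theorem svB_inner_getD (val : List String) (key frag : String)
    (d : PySem.Dict String (List String)) :
    (val.foldl (fun d elem => d.modify elem [] (· ++ [key])) d).getD frag []
      = d.getD frag [] ++ (val.filter (· == frag)).map (fun _ => key) := by
  induction val generalizing d with
  | nil => simp
  | cons e rest ih =>
    simp only [List.foldl_cons, List.filter_cons]
    by_cases h : e = frag
    · subst h
      simp [ih, PySem.Dict.getD_modify_self]
    · have hne : (e == frag) = false := by simp [h]
      have h' : frag ≠ e := Ne.symm h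
      simp [ih, PySem.Dict.getD_modify, h', hne]

theorem svB_index_getD (view : List (String × List String)) (frag : String) :
    (svB_index view).getD frag [] = svKeysFor view frag := by
  unfold svB_index
  suffices h : ∀ (d : PySem.Dict String (List String)),
      (view.foldl (fun d kv => kv.2.foldl (fun d elem => d.modify elem [] (· ++ [kv.1])) d) d).getD frag []
        = d.getD frag [] ++ svKeysFor view frag by
    simpa using h PySem.Dict.empty
  induction view with
  | nil => intro d; simp [svKeysFor]
  | cons kv rest ih =>
    intro d
    simp only [List.foldl_cons, ih, svB_inner_getD, svKeysFor, List.flatMap_cons, List.append_assoc]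

theorem svB_pick_skip (seg keys : List String) (key : String) (sel : PySem.Set String)
    (hall : ∀ x ∈ seg, x = key) (hsel : PySem.Set.contains sel key = true) :
    svB_pick (seg ++ keys) sel = svB_pick keys sel := by
  induction seg with
  | nil => rfl
  | cons x rest ih =>
    have hx : x = key := hall x (by simp)
    simp only [List.cons_append, svB_pick, hx, hsel, if_true]
    exact ih (fun y hy => hall y (by simp [hy]))

theorem svA_find_eq_pick (view : List (String × List String)) (frag : String)
    (res : List String) (sel : PySem.Set String)
    (hinv : ∀ k, PySem.Set.contains sel k = res.contains k) :
    svA_find view frag res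
      = match svB_pick (svKeysFor view frag) sel with
        | none => res
        | some k => res ++ [k] := by
  induction view with
  | nil => simp [svA_find, svKeysFor, svB_pick]
  | cons kv rest ih =>
    obtain ⟨key, val⟩ := kv
    have hkeys : svKeysFor ((key, val) :: rest) frag
        = ((val.filter (· == frag)).map (fun _ => key)) ++ svKeysFor rest frag := by
      simp [svKeysFor]
    rw [hkeys]
    by_cases hc : val.contains frag
    · -- the segment is nonempty and all its elements are key
      obtain ⟨s, hs⟩ : ∃ s, val.filter (· == frag) = frag :: s := by
        have hmem : frag ∈ val.filter (· == frag) := by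
          simp [List.mem_filter]
          exact List.contains_iff_mem.mp hc
        rcases hseq : val.filter (· == frag) with _ | ⟨a, t⟩
        · simp [hseq] at hmem
        · have ha : a = frag := by
            have := List.mem_filter.mp (by rw [hseq]; exact List.mem_cons_self ..)
            simpa using this.2
          refine ⟨t, ?_⟩
          rw [ha]
      by_cases hk : res.contains key
      · have hselk : PySem.Set.contains sel key = true := by rw [hinv]; exact hk
        have hskip : svB_pick (((val.filter (· == frag)).map fun _ => key) ++ svKeysFor rest frag) sel
            = svB_pick (svKeysFor rest frag) sel := by
          apply svB_pick_skip _ _ key _ _ hselk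
          intro x hx
          obtain ⟨a, _, hax⟩ := List.mem_map.mp hx
          exact hax.symm
        rw [hskip]
        simp only [svA_find, hc, hk, Bool.not_true, Bool.and_false, Bool.false_eq_true,
          if_false]
        exact ih
      · have hk' : res.contains key = false := by simpa using hk
        have hselk : PySem.Set.contains sel key = false := by rw [hinv]; exact hk'
        rw [hs]
        simp only [List.map_cons, List.cons_append, svB_pick, hselk, Bool.false_eq_true,
          if_false, svA_find, hc, hk', Bool.not_false, Bool.and_true, if_true]
    · have hc' : val.contains frag = false := by simpa using hc
      have hseg : val.filter (· == frag) = [] := by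
        rw [List.filter_eq_nil_iff]
        intro a ha hab
        exact absurd (List.contains_iff_mem.mpr ((by simpa using hab : a = frag) ▸ ha))
          (by simpa using hc)
      rw [hseg]
      simp only [List.map_nil, List.nil_append, svA_find, hc', Bool.false_and,
        Bool.false_eq_true, if_false]
      exact ih

theorem sv_loop_eq (view : List (String × List String)) (targets : List String)
    (res : List String) (sel : PySem.Set String)
    (hinv : ∀ k, PySem.Set.contains sel k = res.contains k) :
    targets.foldl (fun reselect frag => svA_find view frag reselect) res
      = (targets.foldl (fun (acc : List String × PySem.Set String) frag =>
          match svB_pick (svKeysFor view frag) acc.2 with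
          | none => acc
          | some k => (acc.1 ++ [k], PySem.Set.add acc.2 k)) (res, sel)).1 := by
  induction targets generalizing res sel with
  | nil => rfl
  | cons frag rest ih =>
    rw [List.foldl_cons, List.foldl_cons, svA_find_eq_pick view frag res sel hinv]
    cases hp : svB_pick (svKeysFor view frag) sel with
    | none => simpa [hp] using ih res sel hinv
    | some k =>
      apply ih
      intro x
      have hmm : x ∈ sel ↔ x ∈ res := by simpa using hinv x
      by_cases hk : k ∈ sel
      · have hck : PySem.Set.contains sel k = true := by
          simpa [PySem.Set.contains] using hk
        have hrk : k ∈ res := List.contains_iff_mem.mp ((hinv k) ▸ hck)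
        by_cases hxk : x = k
        · subst hxk
          simp [PySem.Set.add, hk, hrk]
        · simp [PySem.Set.add, hk, hmm, hxk]
      · simp [PySem.Set.add, hk, hmm, List.mem_append, Bool.decide_or]

-- ===== VERDICT (by name: the statement is the Claim_ definition above) =====
theorem select_from_view_spec : Claim_equal_select_from_view := by
  intro view targets _
  unfold Spec_select_from_view select_from_view select_from_view_alt
  simp only [svB_index_getD]
  exact sv_loop_eq view targets [] PySem.Set.empty (fun k => rfl)
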